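-- pv_equiv track=rewrite | github.com/4pierre2/CLOUDY | cloudy_parser.py | split_grids
-- ===== SOURCE A (Python) =====
-- def is_multigrid(lines):
--     n = 0
--     for l in lines:
--         if 'VARY' in l:
--             n += 1
--     return n>0, n
--
-- def split_grids(lines):
--     grids = []
--     grid_numbers = []
--     test, n = is_multigrid(lines)
--     is_first_cp = True
--     if not test:
--         grids.append(lines)
--         return ['grid000000000'], grids
--     else:
--         grid = []
--         for l in lines:
--             if 'GRID_DELIMIT' in l:
--                 if not is_first_cp:
--                     grid_numbers.append(l.split('--')[-1].strip())
--                     grids.append(grid)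
--                 grid = []
--                 is_first_cp = False
--             else:
--                 grid.append(l)
--     return grid_numbers, grids
-- ===== SOURCE B (Python) =====
-- def split_grids(lines):
--     if not any('VARY' in l for l in lines):
--         return ['grid000000000'], [lines]
--     d = [i for i, l in enumerate(lines) if 'GRID_DELIMIT' in l]
--     grids = [lines[a + 1:b] for a, b in zip(d, d[1:])]
--     grid_numbers = [lines[j].split('--')[-1].strip() for j in d[1:]]
--     return grid_numbers, grids
-- ===== Notes on version B (the rewrite author's own statement) =====
-- stated objective: alternative
-- what changed: B replaces A's four-variable accumulator loop (current grid, first-delimiter flag, two output lists) by an index-based decomposition: collect the positions of GRID_DELIMIT lines once, then build the grids as slices between consecutive delimiter positions and the grid numbers from the delimiter lines d[1:].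
import Mathlib
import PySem

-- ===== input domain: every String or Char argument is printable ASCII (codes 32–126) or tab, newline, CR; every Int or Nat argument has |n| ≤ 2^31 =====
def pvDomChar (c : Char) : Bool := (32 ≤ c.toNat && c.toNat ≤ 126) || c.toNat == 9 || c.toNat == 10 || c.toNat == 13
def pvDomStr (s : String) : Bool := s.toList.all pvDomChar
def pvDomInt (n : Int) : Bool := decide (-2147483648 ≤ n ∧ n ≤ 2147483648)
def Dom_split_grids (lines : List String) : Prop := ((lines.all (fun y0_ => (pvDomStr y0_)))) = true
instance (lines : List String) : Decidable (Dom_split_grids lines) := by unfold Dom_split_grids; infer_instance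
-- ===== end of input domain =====

-- B rebuilds the result from the list of GRID_DELIMIT line positions (slices between
-- consecutive delimiters) instead of A's one-pass accumulator loop; same cost, different decomposition.

-- ===== PORT A =====
-- shared port of the identical Python subexpression l.split('--')[-1].strip()
def pvGnum (l : String) : String :=
  PySem.Str.strip (PySem.List.pyGetD ((PySem.Str.split? l "--").getD []) (-1) "")

def is_multigrid (lines : List String) : Bool × Int :=
  let n := lines.foldl (fun n l => if PySem.Str.isIn "VARY" l then n + 1 else n) (0 : Int)
  (decide (n > 0), n)

def split_grids (lines : List String) : List String × List (List String) :=
  let grids : List (List String) := []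
  let grid_numbers : List String := []
  let test := (is_multigrid lines).1
  if !test then
    (["grid000000000"], grids ++ [lines])
  else
    let st := lines.foldl
      (fun (st : List String × List (List String) × List String × Bool) l =>
        if PySem.Str.isIn "GRID_DELIMIT" l then
          if !st.2.2.2 then (st.1 ++ [pvGnum l], st.2.1 ++ [st.2.2.1], ([] : List String), false)
          else (st.1, st.2.1, ([] : List String), false)
        else (st.1, st.2.1, st.2.2.1 ++ [l], st.2.2.2))
      (grid_numbers, grids, ([] : List String), true)
    (st.1, st.2.1)

-- ===== PORT B =====
def split_grids_alt (lines : List String) : List String × List (List String) :=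
  if !(lines.any fun l => PySem.Str.isIn "VARY" l) then
    (["grid000000000"], [lines])
  else
    let d : List Int :=
      ((PySem.List.enumerate lines 0).filter (fun p => PySem.Str.isIn "GRID_DELIMIT" p.2)).map (·.1)
    let grids := (d.zip d.tail).map (fun p => PySem.List.slice lines (some (p.1 + 1)) (some p.2))
    let grid_numbers := d.tail.map (fun j => pvGnum (PySem.List.pyGetD lines j ""))
    (grid_numbers, grids)

-- ===== PRECONDITION & SPEC =====
def Spec_split_grids (lines : List String) (out : List String × List (List String)) : Prop := out = split_grids_alt lines
instance (lines : List String) (out : List String × List (List String)) : Decidable (Spec_split_grids lines out) := by unfold Spec_split_grids; infer_instance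

-- ===== CLAIM (what is proved, stated in full; the proofs are below) =====
def Claim_equal_split_grids : Prop := ∀ (lines : List String), Dom_split_grids lines → Spec_split_grids lines (split_grids lines)

-- ===== LEMMAS AND PROOFS =====

-- the loop step of A's multigrid branch
def pvStepA (st : List String × List (List String) × List String × Bool) (l : String) :
    List String × List (List String) × List String × Bool :=
  if PySem.Str.isIn "GRID_DELIMIT" l then
    if !st.2.2.2 then (st.1 ++ [pvGnum l], st.2.1 ++ [st.2.2.1], ([] : List String), false)
    else (st.1, st.2.1, ([] : List String), false)
  else (st.1, st.2.1, st.2.2.1 ++ [l], st.2.2.2)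

-- recursive characterisation of the loop after the first delimiter
def pvPhase2 (g : List String) : List String → List String × List (List String)
  | [] => ([], [])
  | l :: rest =>
    if PySem.Str.isIn "GRID_DELIMIT" l then
      (pvGnum l :: (pvPhase2 [] rest).1, g :: (pvPhase2 [] rest).2)
    else pvPhase2 (g ++ [l]) rest

-- recursive characterisation of the whole loop
def pvPhase1 : List String → List String × List (List String)
  | [] => ([], [])
  | l :: rest => if PySem.Str.isIn "GRID_DELIMIT" l then pvPhase2 [] rest else pvPhase1 rest

-- delimiter positions as naturals
def pvDidx : List String → List Nat
  | [] => []
  | l :: rest =>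
    if PySem.Str.isIn "GRID_DELIMIT" l then 0 :: (pvDidx rest).map (· + 1)
    else (pvDidx rest).map (· + 1)

def pvSlices (xs : List String) (d : List Nat) : List (List String) :=
  (d.zip d.tail).map (fun p => (xs.drop (p.1 + 1)).take (p.2 - (p.1 + 1)))

def pvNums (xs : List String) (d : List Nat) : List String :=
  d.map (fun k => pvGnum (xs.getD k ""))

-- the grid list produced from a delimiter-position list: leading grid g ++ (prefix up to the
-- first delimiter), then the segments strictly between consecutive delimiters
def pvGridsAux (g : List String) (xs : List String) : List Nat → List (List String)
  | [] => []
  | j0 :: t => (g ++ xs.take j0) :: pvSlices xs (j0 :: t)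

theorem pvDidx_pos (l : String) (rest : List String)
    (hP : PySem.Str.isIn "GRID_DELIMIT" l = true) :
    pvDidx (l :: rest) = 0 :: (pvDidx rest).map (· + 1) := by
  simp only [pvDidx, hP, if_true]

theorem pvDidx_neg (l : String) (rest : List String)
    (hP : PySem.Str.isIn "GRID_DELIMIT" l = false) :
    pvDidx (l :: rest) = (pvDidx rest).map (· + 1) := by
  simp only [pvDidx, hP, Bool.false_eq_true, if_false]

theorem pvNums_shift (x : String) (xs : List String) (d : List Nat) :
    pvNums (x :: xs) (d.map (· + 1)) = pvNums xs d := by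
  simp [pvNums, List.map_map, Function.comp_def]

theorem pvSlices_shift (x : String) (xs : List String) (d : List Nat) :
    pvSlices (x :: xs) (d.map (· + 1)) = pvSlices xs d := by
  simp only [pvSlices, ← List.map_tail, List.zip_map, List.map_map]
  refine List.map_congr_left ?_
  rintro ⟨a, b⟩ _
  simp [Nat.succ_sub_succ, Function.comp]

theorem pvSlices_cons_zero (x : String) (xs : List String) (d : List Nat) :
    pvSlices (x :: xs) (0 :: d.map (· + 1)) = pvGridsAux [] xs d := by
  cases d with
  | nil => simp [pvSlices, pvGridsAux]
  | cons j0 t =>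
    have h := pvSlices_shift x xs (j0 :: t)
    rw [List.map_cons] at h
    simp only [List.map_cons, pvGridsAux, List.nil_append]
    simp only [pvSlices, List.tail_cons, List.zip_cons_cons, List.map_cons] at h ⊢
    refine List.cons_eq_cons.mpr ⟨by simp, h⟩

theorem pvGridsAux_shift (g : List String) (x : String) (xs : List String) (d : List Nat) :
    pvGridsAux g (x :: xs) (d.map (· + 1)) = pvGridsAux (g ++ [x]) xs d := by
  cases d with
  | nil => simp [pvGridsAux]
  | cons j0 t =>
    have h := pvSlices_shift x xs (j0 :: t)
    rw [List.map_cons] at h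
    simp only [List.map_cons, pvGridsAux, h]
    simp [List.take_succ_cons, List.append_assoc]

theorem pvNums_cons_zero (x : String) (xs : List String) (d : List Nat) :
    pvNums (x :: xs) (0 :: d.map (· + 1)) = pvGnum x :: pvNums xs d := by
  simp [pvNums, List.map_map, Function.comp_def]

theorem pvPhase2_char : ∀ (rest : List String) (g : List String),
    pvPhase2 g rest = (pvNums rest (pvDidx rest), pvGridsAux g rest (pvDidx rest)) := by
  intro rest
  induction rest with
  | nil => intro g; simp [pvPhase2, pvNums, pvGridsAux, pvDidx]
  | cons l rest ih =>
    intro g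
    cases hP : PySem.Str.isIn "GRID_DELIMIT" l with
    | true =>
      rw [show pvPhase2 g (l :: rest) =
          (pvGnum l :: (pvPhase2 [] rest).1, g :: (pvPhase2 [] rest).2) from by
        simp only [pvPhase2, hP, if_true], ih, pvDidx_pos l rest hP]
      rw [Prod.mk.injEq]
      constructor
      · exact (pvNums_cons_zero l rest (pvDidx rest)).symm
      · rw [show pvGridsAux g (l :: rest) (0 :: (pvDidx rest).map (· + 1)) =
            (g ++ (l :: rest).take 0) :: pvSlices (l :: rest) (0 :: (pvDidx rest).map (· + 1))
            from rfl, pvSlices_cons_zero]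
        simp
    | false =>
      rw [show pvPhase2 g (l :: rest) = pvPhase2 (g ++ [l]) rest from by
        simp only [pvPhase2, hP, Bool.false_eq_true, if_false], ih, pvDidx_neg l rest hP]
      rw [Prod.mk.injEq]
      exact ⟨(pvNums_shift l rest (pvDidx rest)).symm,
             (pvGridsAux_shift g l rest (pvDidx rest)).symm⟩

theorem pvPhase1_char : ∀ (lines : List String),
    pvPhase1 lines = (pvNums lines (pvDidx lines).tail, pvSlices lines (pvDidx lines)) := by
  intro lines
  induction lines with
  | nil => simp [pvPhase1, pvNums, pvSlices, pvDidx]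
  | cons l rest ih =>
    cases hP : PySem.Str.isIn "GRID_DELIMIT" l with
    | true =>
      rw [show pvPhase1 (l :: rest) = pvPhase2 [] rest from by
        simp only [pvPhase1, hP, if_true], pvPhase2_char, pvDidx_pos l rest hP]
      rw [Prod.mk.injEq]
      constructor
      · rw [List.tail_cons]
        exact (pvNums_shift l rest (pvDidx rest)).symm
      · exact (pvSlices_cons_zero l rest (pvDidx rest)).symm
    | false =>
      rw [show pvPhase1 (l :: rest) = pvPhase1 rest from by
        simp only [pvPhase1, hP, Bool.false_eq_true, if_false], ih, pvDidx_neg l rest hP]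
      rw [Prod.mk.injEq]
      constructor
      · rw [← List.map_tail]
        exact (pvNums_shift l rest (pvDidx rest).tail).symm
      · exact (pvSlices_shift l rest (pvDidx rest)).symm

theorem pvFoldA2 : ∀ (rest : List String) (ns : List String) (gs : List (List String))
    (g : List String),
    ((rest.foldl pvStepA (ns, gs, g, false)).1, (rest.foldl pvStepA (ns, gs, g, false)).2.1) =
      (ns ++ (pvPhase2 g rest).1, gs ++ (pvPhase2 g rest).2) := by
  intro rest
  induction rest with
  | nil => intro ns gs g; simp [pvPhase2]
  | cons l rest ih =>
    intro ns gs g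
    rw [List.foldl_cons]
    cases hP : PySem.Str.isIn "GRID_DELIMIT" l with
    | true =>
      rw [show pvStepA (ns, gs, g, false) l =
          (ns ++ [pvGnum l], gs ++ [g], ([] : List String), false) from by
        simp only [pvStepA, hP, if_true, Bool.not_false], ih,
        show pvPhase2 g (l :: rest) =
          (pvGnum l :: (pvPhase2 [] rest).1, g :: (pvPhase2 [] rest).2) from by
        simp only [pvPhase2, hP, if_true]]
      simp
    | false =>
      rw [show pvStepA (ns, gs, g, false) l = (ns, gs, g ++ [l], false) from by
        simp only [pvStepA, hP, Bool.false_eq_true, if_false], ih,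
        show pvPhase2 g (l :: rest) = pvPhase2 (g ++ [l]) rest from by
        simp only [pvPhase2, hP, Bool.false_eq_true, if_false]]

theorem pvFoldA1 : ∀ (lines : List String) (ns : List String) (gs : List (List String))
    (g : List String),
    ((lines.foldl pvStepA (ns, gs, g, true)).1, (lines.foldl pvStepA (ns, gs, g, true)).2.1) =
      (ns ++ (pvPhase1 lines).1, gs ++ (pvPhase1 lines).2) := by
  intro lines
  induction lines with
  | nil => intro ns gs g; simp [pvPhase1]
  | cons l rest ih =>
    intro ns gs g
    rw [List.foldl_cons]
    cases hP : PySem.Str.isIn "GRID_DELIMIT" l with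
    | true =>
      rw [show pvStepA (ns, gs, g, true) l = (ns, gs, ([] : List String), false) from by
        simp only [pvStepA, hP, if_true, Bool.not_true, Bool.false_eq_true, if_false], pvFoldA2,
        show pvPhase1 (l :: rest) = pvPhase2 [] rest from by
        simp only [pvPhase1, hP, if_true]]
    | false =>
      rw [show pvStepA (ns, gs, g, true) l = (ns, gs, g ++ [l], true) from by
        simp only [pvStepA, hP, Bool.false_eq_true, if_false], ih,
        show pvPhase1 (l :: rest) = pvPhase1 rest from by
        simp only [pvPhase1, hP, Bool.false_eq_true, if_false]]

-- A's VARY counter equals c plus the number of lines containing VARY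
theorem pvCount (lines : List String) (c : Int) :
    lines.foldl (fun n l => if PySem.Str.isIn "VARY" l then n + 1 else n) c =
      c + (lines.countP (fun l => PySem.Str.isIn "VARY" l) : Int) := by
  induction lines generalizing c with
  | nil => simp
  | cons l rest ih =>
    simp only [List.foldl_cons]
    cases h : PySem.Str.isIn "VARY" l with
    | true =>
      rw [if_pos rfl, ih]
      simp only [List.countP_cons, h, if_true]
      push_cast
      ring
    | false =>
      rw [if_neg (by simp), ih]
      simp only [List.countP_cons, h, Bool.false_eq_true, if_false, add_zero]

-- A's VARY counter is positive iff some line contains VARY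
theorem pvTest (lines : List String) :
    (is_multigrid lines).1 = lines.any (fun l => PySem.Str.isIn "VARY" l) := by
  simp only [is_multigrid, pvCount, zero_add]
  cases hA : lines.any (fun l => PySem.Str.isIn "VARY" l) with
  | false =>
    have h0 : lines.countP (fun l => PySem.Str.isIn "VARY" l) = 0 := by
      rw [List.countP_eq_zero]
      intro a ha
      simpa using (List.any_eq_false.mp hA) a ha
    rw [h0]
    simp
  | true =>
    have hpos : 0 < lines.countP (fun l => PySem.Str.isIn "VARY" l) := by
      rw [List.countP_pos_iff]
      obtain ⟨a, ha, hv2⟩ := List.any_eq_true.mp hA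
      exact ⟨a, ha, by simpa using hv2⟩
    have hpos' : (0 : Int) < (lines.countP (fun l => PySem.Str.isIn "VARY" l) : Int) := by
      exact_mod_cast hpos
    simp only [gt_iff_lt, decide_eq_true_eq]
    exact hpos'

-- B's delimiter index list is pvDidx, cast to Int
theorem pvEnum (lines : List String) : ∀ (s : Nat),
    ((PySem.List.enumerate lines (s : Int)).filter
        (fun p => PySem.Str.isIn "GRID_DELIMIT" p.2)).map (·.1) =
      (pvDidx lines).map (fun k => ((s + k : Nat) : Int)) := by
  induction lines with
  | nil => intro s; simp [PySem.List.enumerate_nil, pvDidx]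
  | cons l rest ih =>
    intro s
    rw [PySem.List.enumerate_cons]
    have h1 : ((s : Int) + 1) = ((s + 1 : Nat) : Int) := by push_cast; ring
    cases hP : PySem.Str.isIn "GRID_DELIMIT" l with
    | true =>
      simp only [List.filter_cons, hP, if_true, List.map_cons, h1, ih (s + 1),
        pvDidx_pos l rest hP, List.map_map]
      refine List.cons_eq_cons.mpr ⟨by push_cast; ring, ?_⟩
      refine List.map_congr_left ?_
      intro k _
      simp only [Function.comp_apply]
      push_cast
      ring
    | false =>
      simp only [List.filter_cons, hP, Bool.false_eq_true, if_false, h1, ih (s + 1),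
        pvDidx_neg l rest hP, List.map_map]
      refine List.map_congr_left ?_
      intro k _
      simp only [Function.comp_apply]
      push_cast
      ring

theorem pvAltChar (lines : List String) :
    split_grids_alt lines =
      if !(lines.any fun l => PySem.Str.isIn "VARY" l) then
        (["grid000000000"], [lines])
      else
        (pvNums lines (pvDidx lines).tail, pvSlices lines (pvDidx lines)) := by
  unfold split_grids_alt
  cases hv : lines.any (fun l => PySem.Str.isIn "VARY" l) with
  | true =>
    simp only [Bool.not_true, Bool.false_eq_true, if_false]
    have hd : ((PySem.List.enumerate lines 0).filter
        (fun p => PySem.Str.isIn "GRID_DELIMIT" p.2)).map (·.1) =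
        (pvDidx lines).map (fun k : Nat => (k : Int)) := by
      have h := pvEnum lines 0
      simp only [Nat.cast_zero, Nat.zero_add] at h
      exact h
    rw [hd, Prod.mk.injEq]
    constructor
    · -- grid numbers
      rw [← List.map_tail]
      simp only [List.map_map, pvNums]
      refine List.map_congr_left ?_
      intro k _
      simp [Function.comp]
    · -- grids
      rw [← List.map_tail, List.zip_map]
      simp only [List.map_map, pvSlices]
      refine List.map_congr_left ?_
      rintro ⟨a, b⟩ _
      have h1 : ((a : Int) + 1) = ((a + 1 : Nat) : Int) := by push_cast; ring
      simp only [Function.comp_apply, Prod.map_apply]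
      rw [h1, PySem.List.slice_natCast]
  | false => simp

-- ===== VERDICT (by name: the statement is the Claim_ definition above) =====
theorem split_grids_spec : Claim_equal_split_grids := by
  unfold Claim_equal_split_grids
  intro lines _dom
  unfold Spec_split_grids
  rw [pvAltChar]
  unfold split_grids
  rw [pvTest]
  cases hv : lines.any (fun l => PySem.Str.isIn "VARY" l) with
  | true =>
    simp only [Bool.not_true, Bool.false_eq_true, if_false]
    have hstep : (fun (st : List String × List (List String) × List String × Bool) l =>
        if PySem.Str.isIn "GRID_DELIMIT" l then
          if !st.2.2.2 then (st.1 ++ [pvGnum l], st.2.1 ++ [st.2.2.1], ([] : List String), false)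
          else (st.1, st.2.1, ([] : List String), false)
        else (st.1, st.2.1, st.2.2.1 ++ [l], st.2.2.2)) = pvStepA := by
      funext st l
      simp [pvStepA]
    rw [hstep]
    have h1 := pvFoldA1 lines [] [] []
    rw [Prod.ext_iff] at h1
    obtain ⟨e1, e2⟩ := h1
    simp only [List.nil_append] at e1 e2
    rw [Prod.mk.injEq]
    exact ⟨by rw [e1, pvPhase1_char], by rw [e2, pvPhase1_char]⟩
  | false => simp
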